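-- pv_equiv track=rewrite | github.com/Gaurav-workspace/Desktop | idk/code12.py | ReplaceDiagonal
-- ===== SOURCE A (Python) =====
-- def ReplaceDiagonal(mat,m):
--     if m==1 or m==0:
--         return mat
--     for i in range(m):
--         res = 0
--         if i==0:
--             res+=mat[0][1]
--             res+=mat[1][0]
--             res+=mat[1][1]
--             mat[i][i] = res
--         elif i==m-1:
--             res+=mat[m-2][m-2]
--             res+=mat[m-1][m-2]
--             res+=mat[m-2][m-1]
--             mat[i][i] = res
--         else:
--             res+=mat[i-1][i+1]
--             res+=mat[i-1][i]
--             res+=mat[i-1][i-1]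
--
--             res+=mat[i][i+1]
--             res+=mat[i][i-1]
--
--             res+=mat[i+1][i-1]
--             res+=mat[i+1][i]
--             res+=mat[i+1][i+1]
--             mat[i][i] = res
--     return mat
-- ===== SOURCE B (Python) =====
-- # Different algorithm: unroll A's sequential update into a recurrence
-- # d(i) = d(i-1) + (off-diagonal neighbor sum at i), all read from the
-- # ORIGINAL matrix; compute the increments first, then a running prefix
-- # sum writes the diagonal. mat is mutated in place like A.
-- def ReplaceDiagonal(mat, m):
--     if m < 2:
--         return mat
--     inc = [0]
--     for i in range(1, m - 1):
--         inc.append(mat[i-1][i] + mat[i-1][i+1]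
--                    + mat[i][i-1] + mat[i][i+1]
--                    + mat[i+1][i-1] + mat[i+1][i] + mat[i+1][i+1])
--     inc.append(mat[m-1][m-2] + mat[m-2][m-1])
--     d = mat[0][1] + mat[1][0] + mat[1][1]
--     for i in range(m):
--         d += inc[i]
--         mat[i][i] = d
--     return mat
-- ===== Notes on version B (the rewrite author's own statement) =====
-- stated objective: alternative
-- what changed: A's per-index 3x3 neighborhood update on the mutated matrix (three unrolled boundary branches) is replaced by unrolling the recurrence: B precomputes an increment array of off-diagonal neighbor sums read only from the original matrix, then fills the diagonal with a running prefix sum, never re-reading updated diagonal cells.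
import Mathlib
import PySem

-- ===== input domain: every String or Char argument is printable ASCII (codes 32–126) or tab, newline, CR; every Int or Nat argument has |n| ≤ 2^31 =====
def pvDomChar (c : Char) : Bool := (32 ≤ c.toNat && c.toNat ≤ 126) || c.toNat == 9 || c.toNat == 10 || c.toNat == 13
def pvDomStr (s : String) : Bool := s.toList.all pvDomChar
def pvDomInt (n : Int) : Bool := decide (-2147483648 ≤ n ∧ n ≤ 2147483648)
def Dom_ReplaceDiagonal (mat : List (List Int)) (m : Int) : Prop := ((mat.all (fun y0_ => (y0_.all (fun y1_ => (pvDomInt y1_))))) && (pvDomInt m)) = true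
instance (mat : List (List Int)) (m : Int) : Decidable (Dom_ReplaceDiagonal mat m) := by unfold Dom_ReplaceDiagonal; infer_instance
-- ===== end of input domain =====

-- B unrolls A's sequential diagonal update into a recurrence: it precomputes an
-- increment array of off-diagonal neighbor sums read only from the original matrix,
-- then fills the diagonal with a running prefix sum; B mutates `mat` in place
-- exactly like A; the theorems are about the returned value.

-- ===== PORT A =====
-- mat[i][j] read, totalized by a default (Pre_ keeps every read in range)
def pvGet2 (s : List (List Int)) (i j : Int) : Int :=
  PySem.List.pyGetD (PySem.List.pyGetD s i []) j 0
-- mat[i][i] = v, totalized (Pre_ keeps every write in range)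
def pvSet2 (s : List (List Int)) (i : Int) (v : Int) : List (List Int) :=
  PySem.List.pySetD s i (PySem.List.pySetD (PySem.List.pyGetD s i []) i v)

def ReplaceDiagonal (mat : List (List Int)) (m : Int) : List (List Int) :=
  if m == 1 || m == 0 then mat
  else
    (PySem.List.pyRange 0 m 1).foldl (fun s i =>
      if i == 0 then
        pvSet2 s i (0 + pvGet2 s 0 1 + pvGet2 s 1 0 + pvGet2 s 1 1)
      else if i == m - 1 then
        pvSet2 s i (0 + pvGet2 s (m-2) (m-2) + pvGet2 s (m-1) (m-2) + pvGet2 s (m-2) (m-1))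
      else
        pvSet2 s i (0 + pvGet2 s (i-1) (i+1) + pvGet2 s (i-1) i + pvGet2 s (i-1) (i-1)
          + pvGet2 s i (i+1) + pvGet2 s i (i-1)
          + pvGet2 s (i+1) (i-1) + pvGet2 s (i+1) i + pvGet2 s (i+1) (i+1))) mat

-- ===== PORT B =====
def ReplaceDiagonal_alt (mat : List (List Int)) (m : Int) : List (List Int) :=
  if m < 2 then mat
  else
    let inc := (PySem.List.pyRange 1 (m-1) 1).foldl (fun inc i =>
      inc ++ [pvGet2 mat (i-1) i + pvGet2 mat (i-1) (i+1)
        + pvGet2 mat i (i-1) + pvGet2 mat i (i+1)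
        + pvGet2 mat (i+1) (i-1) + pvGet2 mat (i+1) i + pvGet2 mat (i+1) (i+1)]) [(0 : Int)]
    let inc := inc ++ [pvGet2 mat (m-1) (m-2) + pvGet2 mat (m-2) (m-1)]
    let d := pvGet2 mat 0 1 + pvGet2 mat 1 0 + pvGet2 mat 1 1
    ((PySem.List.pyRange 0 m 1).foldl (fun p i =>
      let d := p.1 + PySem.List.pyGetD inc i 0
      (d, pvSet2 p.2 i d)) ((d, mat) : Int × List (List Int))).2

-- ===== PRECONDITION & SPEC =====
-- Pre_ = exactly the inputs on which A returns: for m ≥ 2 every cell A touches must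
-- exist (row j needs at least min(j+3, m) columns), otherwise A raises IndexError.
def Pre_ReplaceDiagonal (mat : List (List Int)) (m : Int) : Prop :=
  m ≤ 1 ∨ (m ≤ (mat.length : Int) ∧ ∀ j < m.toNat, min (j + 3) m.toNat ≤ (mat.getD j []).length)
instance (mat : List (List Int)) (m : Int) : Decidable (Pre_ReplaceDiagonal mat m) := by
  unfold Pre_ReplaceDiagonal; infer_instance

def pvWitness_ReplaceDiagonal : List (List Int) × Int := ([[1, 2], [3, 4]], 2)

def Spec_ReplaceDiagonal (mat : List (List Int)) (m : Int) (out : List (List Int)) : Prop := out = ReplaceDiagonal_alt mat m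
instance (mat : List (List Int)) (m : Int) (out : List (List Int)) : Decidable (Spec_ReplaceDiagonal mat m out) := by unfold Spec_ReplaceDiagonal; infer_instance

-- ===== CLAIM (what is proved, stated in full; the proofs are below) =====
def Claim_equal_ReplaceDiagonal : Prop := ∀ (mat : List (List Int)) (m : Int), Dom_ReplaceDiagonal mat m → Pre_ReplaceDiagonal mat m → Spec_ReplaceDiagonal mat m (ReplaceDiagonal mat m)

-- ===== LEMMAS AND PROOFS =====
def pvG (s : List (List Int)) (r c : Nat) : Int := (s.getD r []).getD c 0

def pvSt (s : List (List Int)) (j : Nat) (v : Int) : List (List Int) :=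
  s.set j ((s.getD j []).set j v)

def pvD (mat : List (List Int)) (n : Nat) : Nat → Int
  | 0 => 0 + pvG mat 0 1 + pvG mat 1 0 + pvG mat 1 1
  | (k+1) =>
    if k + 2 = n then
      0 + pvD mat n k + pvG mat (n-1) (n-2) + pvG mat (n-2) (n-1)
    else
      0 + pvG mat k (k+2) + pvG mat k (k+1) + pvD mat n k
        + pvG mat (k+1) (k+2) + pvG mat (k+1) k
        + pvG mat (k+2) k + pvG mat (k+2) (k+1) + pvG mat (k+2) (k+2)

def pvW (mat : List (List Int)) (n : Nat) (k : Nat) : List (List Int) :=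
  (List.range k).foldl (fun s j => pvSt s j (pvD mat n j)) mat

-- increment at step k of B's prefix sum, in terms of the original matrix
def pvInc (mat : List (List Int)) (n : Nat) : Nat → Int
  | 0 => 0
  | (k+1) =>
    if k + 2 = n then pvG mat (n-1) (n-2) + pvG mat (n-2) (n-1)
    else pvG mat k (k+2) + pvG mat k (k+1)
      + pvG mat (k+1) (k+2) + pvG mat (k+1) k
      + pvG mat (k+2) k + pvG mat (k+2) (k+1) + pvG mat (k+2) (k+2)

theorem pvSt_length (s : List (List Int)) (j : Nat) (v : Int) :
    (pvSt s j v).length = s.length := by simp [pvSt]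

theorem pvSt_row_length (s : List (List Int)) (j : Nat) (v : Int) (r : Nat) :
    ((pvSt s j v).getD r []).length = ((s.getD r []).length) := by
  simp only [pvSt, List.getD_eq_getElem?_getD, List.getElem?_set]
  by_cases h : j = r
  · subst h
    by_cases hl : j < s.length <;> simp [hl]
  · simp [h]

theorem pvG_pvSt (s : List (List Int)) (j : Nat) (v : Int) (r c : Nat)
    (hj : j < s.length) (hjr : j < (s.getD j []).length) :
    pvG (pvSt s j v) r c = if r = j ∧ c = j then v else pvG s r c := by
  simp only [pvG, pvSt, List.getD_eq_getElem?_getD, List.getElem?_set]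
  by_cases h : j = r
  · subst h
    simp only [hj]
    by_cases hc : j = c
    · subst hc
      simp_all [List.getD_eq_getElem?_getD]
    · simp_all [List.getD_eq_getElem?_getD]
      intro h1; exact absurd h1.symm hc
  · simp [h]
    intro h1 _; exact absurd h1.symm h

theorem pvW_succ (mat : List (List Int)) (n k : Nat) :
    pvW mat n (k+1) = pvSt (pvW mat n k) k (pvD mat n k) := by
  simp [pvW, List.range_succ]

theorem pvW_length (mat : List (List Int)) (n k : Nat) :
    (pvW mat n k).length = mat.length := by
  induction k with
  | zero => rfl
  | succ k ih => rw [pvW_succ, pvSt_length, ih]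

theorem pvW_row_length (mat : List (List Int)) (n k r : Nat) :
    ((pvW mat n k).getD r []).length = (mat.getD r []).length := by
  induction k with
  | zero => rfl
  | succ k ih => rw [pvW_succ, pvSt_row_length, ih]

theorem pvG_pvW (mat : List (List Int)) (n k : Nat)
    (hP : ∀ j < n, j < mat.length ∧ j < (mat.getD j []).length) (hk : k ≤ n) (r c : Nat) :
    pvG (pvW mat n k) r c = if r = c ∧ r < k then pvD mat n r else pvG mat r c := by
  induction k with
  | zero => simp [pvW]
  | succ k ih =>
    have hkn : k < n := by omega
    have hb := hP k hkn
    rw [pvW_succ, pvG_pvSt _ _ _ _ _ (by rw [pvW_length]; exact hb.1)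
        (by rw [pvW_row_length]; exact hb.2)]
    rw [ih (by omega)]
    by_cases h1 : r = k ∧ c = k
    · simp [h1.1, h1.2]
    · simp only [if_neg h1]
      by_cases h2 : r = c ∧ r < k
      · simp [h2.1]
        omega
      · have : ¬ (r = c ∧ r < k + 1) := by
          rcases Nat.lt_or_ge r k with h | h
          · intro hx; exact h2 ⟨hx.1, h⟩
          · intro hx; exact h1 ⟨by omega, by omega⟩
        rw [if_neg h2, if_neg this]

theorem pvGet2_cast (s : List (List Int)) (x y : Int) (a b : Nat)
    (hx : x = (a : Int)) (hy : y = (b : Int)) : pvGet2 s x y = pvG s a b := by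
  subst hx; subst hy; simp [pvGet2, pvG]

theorem pvSet2_cast (s : List (List Int)) (x : Int) (a : Nat) (v : Int)
    (hx : x = (a : Int)) : pvSet2 s x v = pvSt s a v := by
  subst hx; simp [pvSet2, pvSt]

theorem foldl_range_eq {α : Type} (f : α → Nat → α) (W : Nat → α) (n : Nat)
    (hs : ∀ j < n, f (W j) j = W (j+1)) : (List.range n).foldl f (W 0) = W n := by
  induction n with
  | zero => rfl
  | succ k ih =>
    rw [List.range_succ, List.foldl_append]
    rw [ih (fun j hj => hs j (by omega)), List.foldl_cons, List.foldl_nil, hs k (by omega)]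

theorem foldl_range_eq' {α : Type} (f : α → Nat → α) (W : Nat → α) (n : Nat) (a : α)
    (h0 : W 0 = a) (hs : ∀ j < n, f (W j) j = W (j+1)) :
    (List.range n).foldl f a = W n := by
  rw [← h0]; exact foldl_range_eq f W n hs

theorem portA_step (mat : List (List Int)) (m : Int) (hm : 2 ≤ m)
    (hP : ∀ j < m.toNat, j < mat.length ∧ j < (mat.getD j []).length)
    (j : Nat) (hj : j < m.toNat) :
    (fun (s : List (List Int)) (i : Int) =>
      if i == 0 then
        pvSet2 s i (0 + pvGet2 s 0 1 + pvGet2 s 1 0 + pvGet2 s 1 1)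
      else if i == m - 1 then
        pvSet2 s i (0 + pvGet2 s (m-2) (m-2) + pvGet2 s (m-1) (m-2) + pvGet2 s (m-2) (m-1))
      else
        pvSet2 s i (0 + pvGet2 s (i-1) (i+1) + pvGet2 s (i-1) i + pvGet2 s (i-1) (i-1)
          + pvGet2 s i (i+1) + pvGet2 s i (i-1)
          + pvGet2 s (i+1) (i-1) + pvGet2 s (i+1) i + pvGet2 s (i+1) (i+1)))
      (pvW mat m.toNat j) (0 + (j : Int)) = pvW mat m.toNat (j+1) := by
  have hn2 : 2 ≤ m.toNat := by omega
  set n := m.toNat with hn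
  simp only [zero_add]
  have hread := pvG_pvW mat n j hP (by omega)
  by_cases hj0 : j = 0
  · subst hj0
    rw [if_pos (by simp)]
    rw [pvGet2_cast _ _ _ 0 1 (by omega) (by omega),
        pvGet2_cast _ _ _ 1 0 (by omega) (by omega),
        pvGet2_cast _ _ _ 1 1 (by omega) (by omega),
        pvSet2_cast _ _ 0 _ (by omega)]
    rw [hread 0 1, hread 1 0, hread 1 1]
    rw [pvW_succ]
    simp [pvD]
  · rw [if_neg (by simp; omega)]
    by_cases hjl : j = n - 1
    · rw [if_pos (by simp; omega)]
      rw [pvGet2_cast _ _ _ (n-2) (n-2) (by omega) (by omega),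
          pvGet2_cast _ _ _ (n-1) (n-2) (by omega) (by omega),
          pvGet2_cast _ _ _ (n-2) (n-1) (by omega) (by omega),
          pvSet2_cast _ _ j _ (by omega)]
      rw [hread (n-2) (n-2), hread (n-1) (n-2), hread (n-2) (n-1)]
      rw [if_pos (by omega), if_neg (by omega), if_neg (by omega)]
      rw [pvW_succ]
      have hj1 : j = (n - 2) + 1 := by omega
      rw [hj1]
      simp only [pvD, show (n-2) + 2 = n by omega]
      simp
    · rw [if_neg (by simp; omega)]
      have h1 : 1 ≤ j := by omega
      have h2 : j + 1 ≤ n - 1 := by omega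
      rw [pvGet2_cast _ _ _ (j-1) (j+1) (by omega) (by omega),
          pvGet2_cast _ _ _ (j-1) j (by omega) (by omega),
          pvGet2_cast _ _ _ (j-1) (j-1) (by omega) (by omega),
          pvGet2_cast _ _ _ j (j+1) (by omega) (by omega),
          pvGet2_cast _ _ _ j (j-1) (by omega) (by omega),
          pvGet2_cast _ _ _ (j+1) (j-1) (by omega) (by omega),
          pvGet2_cast _ _ _ (j+1) j (by omega) (by omega),
          pvGet2_cast _ _ _ (j+1) (j+1) (by omega) (by omega),
          pvSet2_cast _ _ j _ (by omega)]
      rw [hread (j-1) (j+1), hread (j-1) j, hread (j-1) (j-1), hread j (j+1),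
          hread j (j-1), hread (j+1) (j-1), hread (j+1) j, hread (j+1) (j+1)]
      rw [if_neg (by omega), if_neg (by omega), if_pos (by omega), if_neg (by omega),
          if_neg (by omega), if_neg (by omega), if_neg (by omega), if_neg (by omega)]
      rw [pvW_succ]
      have hj1 : j = (j - 1) + 1 := by omega
      rw [hj1]
      simp only [pvD, show (j-1) + 2 = j + 1 by omega, if_neg (show ¬ (j + 1 = n) by omega),
        show ((j-1) + 1 : Nat) = j by omega]
      simp

theorem portA_eq_pvW (mat : List (List Int)) (m : Int) (hm : 2 ≤ m)
    (hP : ∀ j < m.toNat, j < mat.length ∧ j < (mat.getD j []).length) :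
    ReplaceDiagonal mat m = pvW mat m.toNat m.toNat := by
  unfold ReplaceDiagonal
  rw [if_neg (by simp; omega)]
  rw [PySem.List.pyRange_one, List.foldl_map]
  rw [show (m - 0).toNat = m.toNat by omega]
  have h0 : pvW mat m.toNat 0 = mat := rfl
  rw [← h0]
  exact foldl_range_eq _ _ _ (fun j hj => portA_step mat m hm hP j hj)

-- d(k) = d(k-1) + inc(k): pvD's recurrence, restated with pvInc
theorem pvD_succ_inc (mat : List (List Int)) (n k : Nat) :
    pvD mat n (k+1) = pvD mat n k + pvInc mat n (k+1) := by
  simp only [pvD, pvInc]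
  split <;> ring

-- B's increment list equals pvInc pointwise
theorem portB_inc (mat : List (List Int)) (m : Int) (hm : 2 ≤ m) :
    ((PySem.List.pyRange 1 (m-1) 1).foldl (fun inc i =>
      inc ++ [pvGet2 mat (i-1) i + pvGet2 mat (i-1) (i+1)
        + pvGet2 mat i (i-1) + pvGet2 mat i (i+1)
        + pvGet2 mat (i+1) (i-1) + pvGet2 mat (i+1) i + pvGet2 mat (i+1) (i+1)]) [(0 : Int)])
      ++ [pvGet2 mat (m-1) (m-2) + pvGet2 mat (m-2) (m-1)]
      = (List.range m.toNat).map (pvInc mat m.toNat) := by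
  set n := m.toNat with hn
  have hmid : ∀ k : Nat, k ≤ n - 2 →
      (PySem.List.pyRange 1 (1 + (k : Int)) 1).foldl (fun inc i =>
        inc ++ [pvGet2 mat (i-1) i + pvGet2 mat (i-1) (i+1)
          + pvGet2 mat i (i-1) + pvGet2 mat i (i+1)
          + pvGet2 mat (i+1) (i-1) + pvGet2 mat (i+1) i + pvGet2 mat (i+1) (i+1)]) [(0 : Int)]
      = (List.range (k+1)).map (pvInc mat n) := by
    intro k hk
    induction k with
    | zero => simp [pvInc]
    | succ k ih =>
      rw [show (1 + ((k+1:Nat):Int)) = (1 + (k:Int)) + 1 by push_cast; ring,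
          PySem.List.pyRange_one_succ_right (show (1:Int) ≤ 1 + (k:Int) by omega), List.foldl_append,
          ih (by omega)]
      conv_rhs => rw [List.range_succ, List.map_append]
      simp only [List.foldl_cons, List.foldl_nil, List.map_cons, List.map_nil]
      congr 1
      have hj1 : 1 ≤ k + 1 := by omega
      rw [pvGet2_cast _ _ _ k (k+1) (by omega) (by omega),
          pvGet2_cast _ _ _ k (k+2) (by omega) (by omega),
          pvGet2_cast _ _ _ (k+1) k (by omega) (by omega),
          pvGet2_cast _ _ _ (k+1) (k+2) (by omega) (by omega),
          pvGet2_cast _ _ _ (k+2) k (by omega) (by omega),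
          pvGet2_cast _ _ _ (k+2) (k+1) (by omega) (by omega),
          pvGet2_cast _ _ _ (k+2) (k+2) (by omega) (by omega)]
      simp only [pvInc, if_neg (show ¬ (k + 2 = n) by omega)]
      ring
  have hml : m - 1 = 1 + ((n - 2 : Nat) : Int) := by omega
  rw [hml, hmid (n-2) le_rfl,
      show List.range n = List.range (n - 2 + 1) ++ [n - 2 + 1] by
        conv_lhs => rw [show n = (n - 2 + 1) + 1 by omega]
        rw [List.range_succ],
      List.map_append]
  congr 1
  rw [pvGet2_cast _ _ _ (n-1) (n-2) (by omega) (by omega),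
      pvGet2_cast _ _ _ (n-2) (n-1) (by omega) (by omega)]
  simp [pvInc, show (n - 2) + 2 = n by omega]

theorem portB_eq_pvW (mat : List (List Int)) (m : Int) (hm : 2 ≤ m) :
    ReplaceDiagonal_alt mat m = pvW mat m.toNat m.toNat := by
  unfold ReplaceDiagonal_alt
  rw [if_neg (by omega)]
  simp only
  rw [portB_inc mat m hm]
  set n := m.toNat with hn
  rw [PySem.List.pyRange_one, List.foldl_map, show (m - 0).toNat = n by omega]
  have hstep : ∀ j < n,
      (fun (p : Int × List (List Int)) (i : Int) =>
        ((p.1 + PySem.List.pyGetD ((List.range n).map (pvInc mat n)) i 0),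
          pvSet2 p.2 i (p.1 + PySem.List.pyGetD ((List.range n).map (pvInc mat n)) i 0)))
        ((if j = 0 then pvD mat n 0 else pvD mat n (j-1)), pvW mat n j) (0 + (j : Int))
      = ((if j + 1 = 0 then pvD mat n 0 else pvD mat n ((j+1)-1)), pvW mat n (j+1)) := by
    intro j hj
    simp only [zero_add]
    have hget : PySem.List.pyGetD ((List.range n).map (pvInc mat n)) (j : Int) 0
        = pvInc mat n j := by
      rw [PySem.List.pyGetD_natCast, List.getD_eq_getElem?_getD]
      simp [hj]
    have hval : (if j = 0 then pvD mat n 0 else pvD mat n (j-1)) + pvInc mat n j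
        = pvD mat n j := by
      by_cases hj0 : j = 0
      · subst hj0; simp [pvInc]
      · rw [if_neg hj0, show j = (j-1)+1 by omega, pvD_succ_inc,
            show (j-1)+1 = j by omega]
    rw [hget]
    simp only [hval]
    rw [pvSet2_cast _ _ j _ (by omega), ← pvW_succ]
    simp [show j + 1 - 1 = j by omega]
  have := foldl_range_eq'
    (fun (p : Int × List (List Int)) (i : Nat) =>
      (fun (p : Int × List (List Int)) (i : Int) =>
        ((p.1 + PySem.List.pyGetD ((List.range n).map (pvInc mat n)) i 0),
          pvSet2 p.2 i (p.1 + PySem.List.pyGetD ((List.range n).map (pvInc mat n)) i 0)))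
        p (0 + (i : Int)))
    (fun k => ((if k = 0 then pvD mat n 0 else pvD mat n (k-1)), pvW mat n k)) n
    ((0 + pvGet2 mat 0 1 + pvGet2 mat 1 0 + pvGet2 mat 1 1, mat) : Int × List (List Int))
    (by
      have : pvD mat n 0 = 0 + pvGet2 mat 0 1 + pvGet2 mat 1 0 + pvGet2 mat 1 1 := by
        rw [pvGet2_cast _ _ _ 0 1 (by omega) (by omega),
            pvGet2_cast _ _ _ 1 0 (by omega) (by omega),
            pvGet2_cast _ _ _ 1 1 (by omega) (by omega)]
        simp [pvD]
      rw [this]; rfl)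
    (fun j hj => hstep j hj)
  -- align the initial accumulator: B starts from d = g01+g10+g11 (no leading 0 +)
  have hinit : (pvGet2 mat 0 1 + pvGet2 mat 1 0 + pvGet2 mat 1 1 : Int)
      = 0 + pvGet2 mat 0 1 + pvGet2 mat 1 0 + pvGet2 mat 1 1 := by ring
  rw [hinit]
  rw [this]

theorem pre_to_bounds (mat : List (List Int)) (m : Int) (hm : 2 ≤ m)
    (hpre : Pre_ReplaceDiagonal mat m) :
    ∀ j < m.toNat, j < mat.length ∧ j < (mat.getD j []).length := by
  intro j hj
  rcases hpre with h | ⟨h1, h2⟩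
  · omega
  · exact ⟨by omega, by have := h2 j hj; omega⟩

theorem small_m_A (mat : List (List Int)) (m : Int) (hm : m ≤ 1) :
    ReplaceDiagonal mat m = mat := by
  unfold ReplaceDiagonal
  by_cases h : m = 1 ∨ m = 0
  · rw [if_pos (by simp; omega)]
  · rw [if_neg (by simp; omega)]
    rw [PySem.List.pyRange_one, show (m - 0).toNat = 0 by omega]
    rfl

theorem small_m_B (mat : List (List Int)) (m : Int) (hm : m ≤ 1) :
    ReplaceDiagonal_alt mat m = mat := by
  unfold ReplaceDiagonal_alt
  rw [if_pos (by omega)]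

-- ===== VERDICT (by name: the statement is the Claim_ definition above) =====
theorem ReplaceDiagonal_spec : Claim_equal_ReplaceDiagonal := by
  intro mat m _ hpre
  unfold Spec_ReplaceDiagonal
  by_cases hm : m ≤ 1
  · rw [small_m_A mat m hm, small_m_B mat m hm]
  · have hm2 : 2 ≤ m := by omega
    have hP := pre_to_bounds mat m hm2 hpre
    rw [portA_eq_pvW mat m hm2 hP, portB_eq_pvW mat m hm2]
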